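-- pv_equiv track=rewrite | github.com/yeahloveninja/crypto-22-23 | cp2/cp-2_luhi-haust/luhi-haust-2_fixed.py | BlockPart
-- ===== SOURCE A (Python) =====
-- def BlockPart(txt, l):
-- 	block=list()
-- 	for j in range(l):
-- 		block.append('')
-- 		q=j
-- 		while(q<len(txt)):
-- 			block[j] = block[j]+txt[q]
-- 			q+=l
-- 	return block
-- ===== SOURCE B (Python) =====
-- def BlockPart(txt, l):
--     if l <= 0:
--         return []
--     blocks = ['' for _ in range(l)]
--     for i, ch in enumerate(txt):
--         blocks[i % l] += ch
--     return blocks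
-- ===== Notes on version B (the rewrite author's own statement) =====
-- stated objective: alternative
-- what changed: A makes l separate stride sweeps over txt (one per block); B makes a single round-robin pass over txt, appending each character to bucket i % l.
import Mathlib
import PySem

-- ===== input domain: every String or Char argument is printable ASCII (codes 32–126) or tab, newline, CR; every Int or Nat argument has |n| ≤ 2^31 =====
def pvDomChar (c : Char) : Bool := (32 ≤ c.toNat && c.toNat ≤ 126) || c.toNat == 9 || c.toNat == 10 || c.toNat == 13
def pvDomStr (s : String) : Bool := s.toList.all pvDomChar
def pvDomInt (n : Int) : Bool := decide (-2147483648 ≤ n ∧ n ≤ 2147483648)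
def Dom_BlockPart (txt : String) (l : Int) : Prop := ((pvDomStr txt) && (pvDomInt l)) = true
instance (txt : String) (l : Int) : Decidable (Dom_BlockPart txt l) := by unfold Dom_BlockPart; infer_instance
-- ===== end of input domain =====

-- B replaces A's l separate stride sweeps over txt by one round-robin pass distributing each
-- character to bucket i % l (objective: alternative decomposition, same asymptotic cost).

-- ===== PORT A =====
-- inner 'while q < len(txt): block[j] += txt[q]; q += l'.  fuel = len(txt) suffices: every
-- reached iteration has l ≥ 1 (j comes from range(l), so the loop only runs when l ≥ 1),
-- and q starts at j ≥ 0, so txt[q] is always in range: the .getD ' ' default never fires.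
def pvBlockWhile (cs : List Char) (l : Int) (fuel : Nat) (q : Int) (acc : List Char) : List Char :=
  match fuel with
  | 0 => acc
  | fuel + 1 =>
    if q < (cs.length : Int) then
      pvBlockWhile cs l fuel (q + l) (acc ++ [(PySem.List.pyGet? cs q).getD ' '])
    else acc

def BlockPart (txt : String) (l : Int) : List String :=
  ((PySem.List.pyRange 0 l 1).foldl
    (fun block j => block ++ [pvBlockWhile txt.toList l txt.toList.length j []]) []).map String.ofList

-- ===== PORT B =====
-- blocks[i % l] += ch : the index i % l is in range (0 ≤ i, 0 < l on this branch)
def BlockPart_alt (txt : String) (l : Int) : List String :=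
  if l ≤ 0 then []
  else
    ((PySem.List.enumerate txt.toList 0).foldl
      (fun blocks p => blocks.modify (PySem.Int.mod p.1 l).toNat (· ++ [p.2]))
      (List.replicate l.toNat [])).map String.ofList

-- ===== PRECONDITION & SPEC =====
def Spec_BlockPart (txt : String) (l : Int) (out : List String) : Prop := out = BlockPart_alt txt l
instance (txt : String) (l : Int) (out : List String) : Decidable (Spec_BlockPart txt l out) := by unfold Spec_BlockPart; infer_instance

-- ===== CLAIM (what is proved, stated in full; the proofs are below) =====
def Claim_equal_BlockPart : Prop := ∀ (txt : String) (l : Int), Dom_BlockPart txt l → Spec_BlockPart txt l (BlockPart txt l)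

-- ===== LEMMAS AND PROOFS =====

-- chars of cs at indices q, q + (s+1), q + 2(s+1), …
def pvGather (cs : List Char) (s : Nat) (q : Nat) : List Char :=
  if h : q < cs.length then cs[q] :: pvGather cs s (q + s + 1) else []
termination_by cs.length - q
decreasing_by omega

lemma pvGather_eq (cs : List Char) (s q : Nat) :
    pvGather cs s q = if h : q < cs.length then cs[q] :: pvGather cs s (q + s + 1) else [] := by
  rw [pvGather]

lemma pvBlockWhile_eq_gather (cs : List Char) (n : Nat) (hn : 0 < n) :
    ∀ (fuel q : Nat) (acc : List Char), cs.length ≤ fuel + q →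
      pvBlockWhile cs (n : Int) fuel (q : Int) acc = acc ++ pvGather cs (n - 1) q := by
  intro fuel
  induction fuel with
  | zero =>
    intro q acc h
    rw [pvGather_eq, dif_neg (by omega)]
    simp [pvBlockWhile]
  | succ fuel ih =>
    intro q acc h
    rw [pvGather_eq]
    by_cases hq : q < cs.length
    · rw [dif_pos hq]
      simp only [pvBlockWhile]
      rw [if_pos (by exact_mod_cast hq)]
      have hcast : (q : Int) + (n : Int) = ((q + n : Nat) : Int) := by push_cast; ring
      rw [hcast]
      have hget : (PySem.List.pyGet? cs (q : Int)).getD ' ' = cs[q] := by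
        simp [hq]
      rw [hget, ih (q + n) (acc ++ [cs[q]]) (by omega)]
      have hs : q + (n - 1) + 1 = q + n := by omega
      rw [hs]
      simp
    · rw [dif_neg hq]
      simp only [pvBlockWhile]
      rw [if_neg (by exact_mod_cast hq)]
      simp

lemma foldl_append_map {α β : Type} (xs : List α) (f : α → β) (init : List β) :
    xs.foldl (fun b j => b ++ [f j]) init = init ++ xs.map f := by
  induction xs generalizing init with
  | nil => simp
  | cons x xs ih => simp [ih]

lemma BlockPart_eq_map_gather (txt : String) (n : Nat) (hn : 0 < n) :
    BlockPart txt (n : Int) = (List.range n).map (fun j => String.ofList (pvGather txt.toList (n - 1) j)) := by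
  unfold BlockPart
  rw [PySem.List.pyRange_one, foldl_append_map]
  simp only [List.nil_append, List.map_map, sub_zero, Int.toNat_natCast]
  apply List.map_congr_left
  intro k hk
  simp only [Function.comp_apply, zero_add]
  rw [pvBlockWhile_eq_gather txt.toList n hn txt.toList.length k [] (by omega)]
  simp

-- the stride set {q, q+n, q+2n, …} hits index cs.length iff q ≤ len ∧ n ∣ len - q
lemma pvGather_append (cs : List Char) (c : Char) (s : Nat) :
    ∀ q, pvGather (cs ++ [c]) s q =
      pvGather cs s q ++ (if q ≤ cs.length ∧ (s + 1) ∣ (cs.length - q) then [c] else []) := by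
  have H : ∀ (m q : Nat), cs.length + 1 - q ≤ m →
      pvGather (cs ++ [c]) s q =
        pvGather cs s q ++ (if q ≤ cs.length ∧ (s + 1) ∣ (cs.length - q) then [c] else []) := by
    intro m
    induction m with
    | zero =>
      intro q hm
      rw [pvGather_eq (cs ++ [c]) s q, dif_neg (by simp; omega),
          pvGather_eq cs s q, dif_neg (by omega), if_neg (by omega)]
      simp
    | succ m ih =>
      intro q hm
      by_cases h1 : q < cs.length
      · rw [pvGather_eq (cs ++ [c]) s q, dif_pos (by simp; omega),
            pvGather_eq cs s q, dif_pos h1]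
        rw [List.getElem_append_left h1]
        rw [ih (q + s + 1) (by omega)]
        have hiff : (q + s + 1 ≤ cs.length ∧ (s + 1) ∣ (cs.length - (q + s + 1))) ↔
            (q ≤ cs.length ∧ (s + 1) ∣ (cs.length - q)) := by
          constructor
          · rintro ⟨hle, k, hk⟩
            refine ⟨by omega, k + 1, ?_⟩
            have he : (s + 1) * (k + 1) = (s + 1) * k + (s + 1) := by ring
            omega
          · rintro ⟨hle, k, hk⟩
            have hk1 : 1 ≤ k := by rcases k with _ | k <;> omega
            have hmul : (s + 1) * 1 ≤ (s + 1) * k := Nat.mul_le_mul_left _ hk1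
            have he : (s + 1) * k = (s + 1) * (k - 1) + (s + 1) := by
              conv_lhs => rw [show k = (k - 1) + 1 from by omega]
              ring
            exact ⟨by omega, k - 1, by omega⟩
        rw [if_congr hiff rfl rfl]
        simp
      · by_cases h2 : q = cs.length
        · subst h2
          rw [pvGather_eq (cs ++ [c]) s cs.length, dif_pos (by simp),
              pvGather_eq cs s cs.length, dif_neg (by omega),
              pvGather_eq (cs ++ [c]) s (cs.length + s + 1), dif_neg (by simp),
              if_pos (by simp)]
          simp [List.getElem_append_right (le_refl cs.length)]
        · rw [pvGather_eq (cs ++ [c]) s q, dif_neg (by simp; omega),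
              pvGather_eq cs s q, dif_neg (by omega), if_neg (by omega)]
          simp
  intro q
  exact H (cs.length + 1 - q) q (le_refl _)

lemma modify_map_range {β : Type} (n j : Nat) (_hj : j < n) (g : Nat → β) (f : β → β) :
    ((List.range n).map g).modify j f = (List.range n).map (fun i => if i = j then f (g i) else g i) := by
  apply List.ext_getElem
  · simp
  · intro i h1 h2
    simp only [List.getElem_modify, List.getElem_map, List.getElem_range]
    by_cases h : i = j
    · simp [h]
    · rw [if_neg (fun hh => h hh.symm), if_neg h]

lemma mod_hit_iff (n len j : Nat) (_hn : 0 < n) (hj : j < n) :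
    (j ≤ len ∧ n ∣ (len - j)) ↔ len % n = j := by
  constructor
  · rintro ⟨hle, k, hk⟩
    have h : len = n * k + j := by omega
    rw [h, Nat.mul_add_mod, Nat.mod_eq_of_lt hj]
  · intro h
    refine ⟨h ▸ Nat.mod_le len n, len / n, ?_⟩
    have := Nat.div_add_mod len n
    omega

lemma pvGather_nil (s q : Nat) : pvGather [] s q = [] := by
  rw [pvGather_eq]; simp

lemma altFold_eq_map_gather (n : Nat) (hn : 0 < n) (cs : List Char) :
    (PySem.List.enumerate cs 0).foldl
      (fun blocks p => blocks.modify (PySem.Int.mod p.1 (n : Int)).toNat (· ++ [p.2]))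
      (List.replicate n []) = (List.range n).map (fun j => pvGather cs (n - 1) j) := by
  induction cs using List.reverseRecOn with
  | nil =>
    rw [PySem.List.enumerate_nil]
    simp [pvGather_nil, List.map_const']
  | append_singleton cs c ih =>
    rw [PySem.List.enumerate_append, List.foldl_append, ih]
    rw [PySem.List.enumerate_cons, PySem.List.enumerate_nil]
    simp only [List.foldl_cons, List.foldl_nil]
    have hmod : (PySem.Int.mod ((0 : Int) + (cs.length : Nat)) (n : Int)).toNat = cs.length % n := by
      rw [zero_add]
      simp
      omega
    rw [hmod, modify_map_range n (cs.length % n) (Nat.mod_lt _ hn)]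
    apply List.map_congr_left
    intro j hj
    simp only [List.mem_range] at hj
    rw [pvGather_append cs c (n - 1) j]
    have hs : n - 1 + 1 = n := by omega
    rw [hs, if_congr (mod_hit_iff n cs.length j hn hj) rfl rfl]
    by_cases h : cs.length % n = j
    · rw [if_pos h, if_pos h.symm]
    · rw [if_neg h, if_neg (fun hh => h hh.symm)]
      simp

-- ===== VERDICT (by name: the statement is the Claim_ definition above) =====
theorem BlockPart_spec : Claim_equal_BlockPart := by
  intro txt l _
  unfold Spec_BlockPart
  by_cases hl : l ≤ 0
  · unfold BlockPart BlockPart_alt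
    rw [if_pos hl, PySem.List.pyRange_one_eq_nil hl]
    simp
  · have hl' : 0 < l := by omega
    have hn : 0 < l.toNat := by omega
    have hcast : l = (l.toNat : Int) := by omega
    unfold BlockPart_alt
    rw [if_neg (by omega)]
    rw [hcast]
    simp only [Int.toNat_natCast]
    rw [BlockPart_eq_map_gather txt l.toNat hn, altFold_eq_map_gather l.toNat hn txt.toList]
    simp
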